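-- pv_equiv track=rewrite | github.com/srisaipog/ICS4U-Classwork | assert_learning/functions.py | blip_blop
-- ===== SOURCE A (Python) =====
-- def blip_blop(words):
--     final = ""
--
--     words = words.split()
--
--     for i in range(len(words)):
--         if i % 2 == 0:
--             final += "blip "
--         elif i % 2 != 0:
--             final += "blop "
--
--     final = final.strip()
--
--     return final
-- ===== SOURCE B (Python) =====
-- def blip_blop(words):
--     n = len(words.split())
--     return ("blip blop " * (n // 2) + "blip " * (n % 2)).strip()
-- ===== Notes on version B (the rewrite author's own statement) =====
-- stated objective: simpler
-- what changed: Replaces the per-index loop with its parity branch by a closed form: count the words once and build the result by string repetition of the two-word pattern n//2 times plus one leading word if n is odd, then a single strip.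
import Mathlib
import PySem

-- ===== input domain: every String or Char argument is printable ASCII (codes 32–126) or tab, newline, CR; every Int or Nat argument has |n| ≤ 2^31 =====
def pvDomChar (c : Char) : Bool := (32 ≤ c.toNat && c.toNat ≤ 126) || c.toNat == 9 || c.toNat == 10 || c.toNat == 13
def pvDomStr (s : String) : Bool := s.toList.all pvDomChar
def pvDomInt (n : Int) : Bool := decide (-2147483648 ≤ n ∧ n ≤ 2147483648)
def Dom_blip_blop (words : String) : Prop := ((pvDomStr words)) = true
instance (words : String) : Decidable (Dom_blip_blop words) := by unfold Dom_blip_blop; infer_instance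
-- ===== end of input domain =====

-- B replaces A's per-index loop and i%2 branch by a closed form built from the word count (simpler).

-- ===== PORT A =====
def blip_blop (words : String) : String :=
  let ws := PySem.Str.split₀ words
  let final : String :=
    (PySem.List.pyRange 0 (ws.length : Int) 1).foldl
      (fun acc i =>
        if PySem.Int.mod i 2 == 0 then acc ++ "blip "
        else if PySem.Int.mod i 2 != 0 then acc ++ "blop "
        else acc) ""
  PySem.Str.strip final

-- ===== PORT B =====
-- port of Python's 's * k' (string repetition)
def pvRepeat (s : String) : Nat → String
  | 0 => ""
  | k + 1 => s ++ pvRepeat s k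

def blip_blop_alt (words : String) : String :=
  let n := (PySem.Str.split₀ words).length
  PySem.Str.strip (pvRepeat "blip blop " (n / 2) ++ pvRepeat "blip " (n % 2))

-- ===== PRECONDITION & SPEC =====
def Spec_blip_blop (words : String) (out : String) : Prop := out = blip_blop_alt words
instance (words : String) (out : String) : Decidable (Spec_blip_blop words out) := by unfold Spec_blip_blop; infer_instance

-- ===== CLAIM (what is proved, stated in full; the proofs are below) =====
def Claim_equal_blip_blop : Prop := ∀ (words : String), Dom_blip_blop words → Spec_blip_blop words (blip_blop words)

-- ===== LEMMAS AND PROOFS =====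

theorem pvRepeat_succ_right (s : String) (k : Nat) :
    pvRepeat s (k + 1) = pvRepeat s k ++ s := by
  induction k with
  | zero => simp [pvRepeat]
  | succ k ih =>
      show s ++ pvRepeat s (k + 1) = (s ++ pvRepeat s k) ++ s
      rw [ih, String.append_assoc]

theorem loop_closed (n : Nat) :
    (PySem.List.pyRange 0 (n : Int) 1).foldl
      (fun acc i =>
        if PySem.Int.mod i 2 == 0 then acc ++ "blip "
        else if PySem.Int.mod i 2 != 0 then acc ++ "blop "
        else acc) ""
    = pvRepeat "blip blop " (n / 2) ++ pvRepeat "blip " (n % 2) := by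
  induction n with
  | zero => simp [pvRepeat]
  | succ n ih =>
      have hcast : ((n + 1 : Nat) : Int) = (n : Int) + 1 := by push_cast; ring
      rw [hcast, PySem.List.pyRange_one_succ_right (by positivity),
        List.foldl_append, ih]
      simp only [List.foldl]
      have hmod : PySem.Int.mod (n : Int) 2 = ((n % 2 : Nat) : Int) := by
        simp [PySem.Int.mod, Int.fmod_eq_emod]
      have hcat : ("blip " : String) ++ "blop " = "blip blop " := rfl
      rcases Nat.mod_two_eq_zero_or_one n with h | h
      · have hm0 : PySem.Int.mod (n : Int) 2 = 0 := by rw [hmod, h]; rfl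
        have h2 : (n + 1) / 2 = n / 2 := by omega
        have h3 : (n + 1) % 2 = 1 := by omega
        rw [hm0, h, h2, h3]
        simp [pvRepeat]
      · have hm1 : PySem.Int.mod (n : Int) 2 = 1 := by rw [hmod, h]; rfl
        have h2 : (n + 1) / 2 = n / 2 + 1 := by omega
        have h3 : (n + 1) % 2 = 0 := by omega
        rw [hm1, h, h2, h3, pvRepeat_succ_right]
        simp [pvRepeat, String.append_assoc, hcat]
        rw [← pvRepeat_succ_right]
        rfl

-- ===== VERDICT (by name: the statement is the Claim_ definition above) =====
theorem blip_blop_spec : Claim_equal_blip_blop := by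
  intro words _
  show blip_blop words = blip_blop_alt words
  simp only [blip_blop, blip_blop_alt]
  rw [loop_closed]
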